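-- pv_equiv track=rewrite | github.com/Eco-Flow/excon | bin/make_ultrametric.py | _split_children
-- ===== SOURCE A (Python) =====
-- def _split_children(inner):
--     """Split comma-separated newick children respecting nested parentheses."""
--     children, depth, buf = [], 0, []
--     for c in inner:
--         if c == '(':
--             depth += 1
--             buf.append(c)
--         elif c == ')':
--             depth -= 1
--             buf.append(c)
--         elif c == ',' and depth == 0:
--             children.append(''.join(buf))
--             buf = []
--         else:
--             buf.append(c)
--     if buf:
--         children.append(''.join(buf))
--     return children
-- ===== SOURCE B (Python) =====
-- def _top_level_comma(s):
--     """Index of the first comma at parenthesis depth 0, or None."""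
--     depth = 0
--     for i, c in enumerate(s):
--         if c == '(':
--             depth += 1
--         elif c == ')':
--             depth -= 1
--         elif c == ',' and depth == 0:
--             return i
--     return None
--
--
-- def _split_children(inner):
--     """Split comma-separated newick children respecting nested parentheses."""
--     i = _top_level_comma(inner)
--     if i is None:
--         return [inner] if inner else []
--     return [inner[:i]] + _split_children(inner[i + 1:])
-- ===== Notes on version B (the rewrite author's own statement) =====
-- stated objective: alternative
-- what changed: Replaces A's single pass with a mutable (children, depth, buf) accumulator by a recursive decomposition: find the first top-level comma, slice off the head segment, recurse on the rest; the trailing-empty-segment drop falls out of the no-comma base case.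
import Mathlib
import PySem

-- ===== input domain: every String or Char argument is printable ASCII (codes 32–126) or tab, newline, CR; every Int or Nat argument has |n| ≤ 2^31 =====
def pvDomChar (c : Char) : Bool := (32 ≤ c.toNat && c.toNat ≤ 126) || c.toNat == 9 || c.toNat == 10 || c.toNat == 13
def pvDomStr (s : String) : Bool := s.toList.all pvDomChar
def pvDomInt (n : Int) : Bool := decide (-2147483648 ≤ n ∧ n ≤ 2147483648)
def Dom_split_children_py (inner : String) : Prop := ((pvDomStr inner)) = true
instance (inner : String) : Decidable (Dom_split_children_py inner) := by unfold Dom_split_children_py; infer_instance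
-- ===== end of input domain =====

-- B replaces A's one-pass accumulator loop by recursive decomposition at the first
-- top-level comma (objective: alternative); return values only, no mutation involved.

-- ===== PORT A =====
-- one iteration of A's for-loop; state = (children, depth, buf)
def stepA (st : List String × Int × List Char) (c : Char) : List String × Int × List Char :=
  let (children, depth, buf) := st
  if c = '(' then (children, depth + 1, buf ++ [c])
  else if c = ')' then (children, depth - 1, buf ++ [c])
  else if c = ',' ∧ depth = 0 then (children ++ [String.mk buf], depth, [])
  else (children, depth, buf ++ [c])

def split_children_py (inner : String) : List String :=
  let st := inner.toList.foldl stepA ([], 0, [])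
  if st.2.2 ≠ [] then st.1 ++ [String.mk st.2.2] else st.1

-- ===== PORT B =====
-- _top_level_comma: index of first comma at depth 0 (index tracking becomes the `+1` map)
def findCut : List Char → Int → Option Nat
  | [], _ => none
  | c :: cs, depth =>
    if c = '(' then (findCut cs (depth + 1)).map (· + 1)
    else if c = ')' then (findCut cs (depth - 1)).map (· + 1)
    else if c = ',' ∧ depth = 0 then some 0
    else (findCut cs depth).map (· + 1)

theorem findCut_lt : ∀ (cs : List Char) (d : Int) (i : Nat), findCut cs d = some i → i < cs.length := by
  intro cs
  induction cs with
  | nil => intro d i h; simp [findCut] at h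
  | cons c cs ih =>
    intro d i h
    simp only [findCut] at h
    split_ifs at h with h1 h2 h3
    · rcases Option.map_eq_some_iff.mp h with ⟨j, hj, rfl⟩
      have := ih _ _ hj; simp; omega
    · rcases Option.map_eq_some_iff.mp h with ⟨j, hj, rfl⟩
      have := ih _ _ hj; simp; omega
    · cases h; simp
    · rcases Option.map_eq_some_iff.mp h with ⟨j, hj, rfl⟩
      have := ih _ _ hj; simp; omega

def splitB (cs : List Char) : List (List Char) :=
  match h : findCut cs 0 with
  | none => if cs = [] then [] else [cs]
  | some i => cs.take i :: splitB (cs.drop (i + 1))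
termination_by cs.length
decreasing_by
  have := findCut_lt cs 0 i h
  simp [List.length_drop]; omega

def split_children_py_alt (inner : String) : List String :=
  (splitB inner.toList).map String.mk

-- ===== PRECONDITION & SPEC =====
def Spec_split_children_py (inner : String) (out : List String) : Prop := out = split_children_py_alt inner
instance (inner : String) (out : List String) : Decidable (Spec_split_children_py inner out) := by unfold Spec_split_children_py; infer_instance

-- ===== CLAIM (what is proved, stated in full; the proofs are below) =====
def Claim_equal_split_children_py : Prop := ∀ (inner : String), Dom_split_children_py inner → Spec_split_children_py inner (split_children_py inner)

-- ===== LEMMAS AND PROOFS =====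

-- A's post-loop finish (proof helper)
def finishA (st : List String × Int × List Char) : List String :=
  if st.2.2 ≠ [] then st.1 ++ [String.mk st.2.2] else st.1

-- generalized B: segments of `cs` starting at depth `depth`, first segment prefixed by `buf`
def G (cs : List Char) (depth : Int) (buf : List Char) : List (List Char) :=
  match findCut cs depth with
  | none => if buf ++ cs = [] then [] else [buf ++ cs]
  | some i => (buf ++ cs.take i) :: splitB (cs.drop (i + 1))

theorem G_zero_nil (cs : List Char) : G cs 0 [] = splitB cs := by
  rw [splitB, G]
  cases h : findCut cs 0 <;> simp

theorem G_shift (c : Char) (cs : List Char) (depth d' : Int) (buf : List Char)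
    (h : findCut (c :: cs) depth = (findCut cs d').map (· + 1)) :
    G (c :: cs) depth buf = G cs d' (buf ++ [c]) := by
  unfold G
  rw [h]
  cases hf : findCut cs d' with
  | none => simp
  | some i => simp [List.drop_succ_cons, List.take_succ_cons]

theorem loopA_eq : ∀ (cs : List Char) (children : List String) (depth : Int) (buf : List Char),
    finishA (cs.foldl stepA (children, depth, buf))
    = children ++ (G cs depth buf).map String.mk := by
  intro cs
  induction cs with
  | nil =>
    intro children depth buf
    simp only [List.foldl_nil, G, findCut, finishA]
    cases buf <;> simp
  | cons c cs ih =>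
    intro children depth buf
    simp only [List.foldl_cons]
    by_cases h1 : c = '('
    · rw [show stepA (children, depth, buf) c = (children, depth + 1, buf ++ [c]) by
        simp [stepA, h1]]
      rw [ih, G_shift c cs depth (depth + 1) buf (by simp [findCut, h1])]
    · by_cases h2 : c = ')'
      · rw [show stepA (children, depth, buf) c = (children, depth - 1, buf ++ [c]) by
          simp [stepA, h2]]
        rw [ih, G_shift c cs depth (depth - 1) buf (by simp [findCut, h2])]
      · by_cases h3 : c = ',' ∧ depth = 0
        · obtain ⟨rfl, rfl⟩ := h3
          rw [show stepA (children, 0, buf) ',' = (children ++ [String.mk buf], 0, []) by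
            simp [stepA]]
          rw [ih]
          have hG : G (',' :: cs) 0 buf = buf :: splitB cs := by
            unfold G
            rw [show findCut (',' :: cs) 0 = some 0 by simp [findCut]]
            simp
          rw [hG, G_zero_nil]
          simp
        · rw [show stepA (children, depth, buf) c = (children, depth, buf ++ [c]) by
            simp [stepA, h1, h2, h3]]
          rw [ih, G_shift c cs depth depth buf (by simp [findCut, h1, h2, h3])]

-- ===== VERDICT (by name: the statement is the Claim_ definition above) =====
theorem split_children_py_spec : Claim_equal_split_children_py := by
  intro inner _
  unfold Spec_split_children_py split_children_py split_children_py_alt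
  have h := loopA_eq inner.toList [] 0 []
  unfold finishA at h
  simp only [ne_eq] at h ⊢
  rw [h, G_zero_nil]
  simp
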